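-- pv_equiv track=rewrite | github.com/PennyLaneAI/pennylane | pennylane/labs/trotter_error/product_formulas/bch.py | _partitions_nonnegative
-- ===== SOURCE A (Python) =====
-- from collections.abc import Generator, Hashable, Sequence
--
-- def _partitions_nonnegative(m: int, n: int) -> Generator[tuple[int]]:
--     """Yields tuples of m nonnegative integers that sum to n"""
--
--     if m == 1:
--         yield (n,)
--     elif m == 0:
--         yield (0,) * m
--     else:
--         for i in range(n + 1):
--             for partition in _partitions_nonnegative(m - 1, n - i):
--                 yield (i,) + partition
-- ===== SOURCE B (Python) =====
-- def _partitions_nonnegative(m, n):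
--     """Yields tuples of m nonnegative integers that sum to n"""
--
--     if m == 0:
--         yield ()
--         return
--     if n < 0:
--         # no tuples of nonnegative integers sum to a negative number
--         return
--     # iterative depth-first search with an explicit stack of
--     # (prefix built so far, parts still to place, remaining sum)
--     stack = [((), m, n)]
--     while stack:
--         prefix, k, r = stack.pop()
--         if k == 1:
--             yield prefix + (r,)
--         else:
--             for i in reversed(range(r + 1)):
--                 stack.append((prefix + (i,), k - 1, r - i))
-- ===== Notes on version B (the rewrite author's own statement) =====
-- stated objective: alternative
-- what changed: Replaces A's recursion on m with an iterative depth-first search over an explicit stack of (prefix, parts left, remaining sum) states; Pre_ excludes only m < 0 with n >= 0, where A recurses forever (RecursionError).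
-- intended difference: For m == 1 and n < 0, A yields the singleton (n,) with a negative entry although the function's purpose is tuples of nonnegative integers summing to n; B yields nothing there, which is the intended value. — e.g. on _partitions_nonnegative(1, -1): A returns [[-1]], B returns []
import Mathlib
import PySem

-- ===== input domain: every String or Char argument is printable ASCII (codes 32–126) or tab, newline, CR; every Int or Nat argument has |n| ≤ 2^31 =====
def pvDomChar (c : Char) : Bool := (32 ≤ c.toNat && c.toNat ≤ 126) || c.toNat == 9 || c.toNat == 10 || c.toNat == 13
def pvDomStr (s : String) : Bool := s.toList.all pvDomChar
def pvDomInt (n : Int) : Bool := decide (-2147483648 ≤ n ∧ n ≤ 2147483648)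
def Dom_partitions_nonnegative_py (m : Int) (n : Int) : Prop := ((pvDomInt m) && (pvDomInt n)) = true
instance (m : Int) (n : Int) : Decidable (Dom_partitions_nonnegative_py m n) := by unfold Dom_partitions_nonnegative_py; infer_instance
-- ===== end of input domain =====

-- B replaces A's recursion on m by an iterative depth-first search over an explicit stack
-- (alternative decomposition, not claimed faster); both generators are ported as the list
-- of their yields.

-- ===== PORT A =====
-- A recurses on m; it terminates exactly when m ≥ 0, or m < 0 ∧ n < 0 (empty loop).
-- Ported with fuel m.toNat + 1, which suffices on all of those inputs; on m < 0 ∧ n ≥ 0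
-- Python A diverges (RecursionError, excluded by Pre_) and the port's fuel default is [].
def pvAFuel : Nat → Int → Int → List (List Int)
  | 0, _, _ => []
  | fuel+1, m, n =>
    if m = 1 then [[n]]
    else if m = 0 then [[]]
    else (PySem.List.pyRange 0 (n+1) 1).flatMap (fun i =>
      (pvAFuel fuel (m-1) (n-i)).map (fun p => i :: p))

def partitions_nonnegative_py (m : Int) (n : Int) : List (List Int) :=
  pvAFuel (m.toNat + 1) m n

-- ===== PORT B =====
-- the while-loop over the explicit stack; the Lean stack keeps its top at the HEAD:
-- Python pushes i = r, r-1, …, 0 and pops from the end, so the children are popped in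
-- the order i = 0, 1, …, r — exactly the order pyRange lists them here.
-- The while loop terminates whenever it is entered with m ≥ 1 and n ≥ 0 (each pop either
-- yields or replaces an entry by entries with smaller k); it is ported with fuel
-- (n.toNat + 2) ^ m.toNat, proved sufficient below (lemma pvW_le_pow / pvB_run).
def pvBLoop : Nat → List (List Int × Int × Int) → List (List Int)
  | 0, _ => []
  | _+1, [] => []
  | fuel+1, (pre, k, r) :: rest =>
    if k = 1 then (pre ++ [r]) :: pvBLoop fuel rest
    else pvBLoop fuel
      (((PySem.List.pyRange 0 (r+1) 1).map (fun i => (pre ++ [i], k - 1, r - i))) ++ rest)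

def partitions_nonnegative_py_alt (m : Int) (n : Int) : List (List Int) :=
  if m = 0 then [[]]
  else if n < 0 then []
  else pvBLoop ((n.toNat + 2) ^ m.toNat) [(([] : List Int), m, n)]

-- ===== PRECONDITION & SPEC =====
-- Pre_ excludes exactly the inputs m < 0 ∧ 0 ≤ n, on which Python A never returns
-- (unbounded recursion, RecursionError).
def Pre_partitions_nonnegative_py (m : Int) (n : Int) : Prop := 0 ≤ m ∨ n < 0
instance (m : Int) (n : Int) : Decidable (Pre_partitions_nonnegative_py m n) := by
  unfold Pre_partitions_nonnegative_py; infer_instance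

def pvWitness_partitions_nonnegative_py : Int × Int := (2, 3)

-- For m == 1 and n < 0, A yields the singleton (n,) with a negative entry although the
-- function's purpose is tuples of NONNEGATIVE integers summing to n; B yields nothing
-- there, which is the intended value.
def D_partitions_nonnegative_py (m : Int) (n : Int) : Prop := m = 1 ∧ n < 0
instance (m : Int) (n : Int) : Decidable (D_partitions_nonnegative_py m n) := by
  unfold D_partitions_nonnegative_py; infer_instance

def Spec_partitions_nonnegative_py (m : Int) (n : Int) (out : List (List Int)) : Prop :=
  ¬ D_partitions_nonnegative_py m n → out = partitions_nonnegative_py_alt m n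
instance (m : Int) (n : Int) (out : List (List Int)) :
    Decidable (Spec_partitions_nonnegative_py m n out) := by
  unfold Spec_partitions_nonnegative_py; infer_instance

def pvDiffWitness_partitions_nonnegative_py : Int × Int := (1, -1)
def pvDiffWitnessOut_partitions_nonnegative_py : (List (List Int)) × (List (List Int)) :=
  ([[-1]], [])

-- ===== CLAIM (what is proved, stated in full; the proofs are below) =====
def Claim_unchanged_partitions_nonnegative_py : Prop :=
  ∀ (m : Int) (n : Int), Dom_partitions_nonnegative_py m n →
    Pre_partitions_nonnegative_py m n →
    Spec_partitions_nonnegative_py m n (partitions_nonnegative_py m n)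
def Claim_changed_partitions_nonnegative_py : Prop :=
  Dom_partitions_nonnegative_py (pvDiffWitness_partitions_nonnegative_py.1) (pvDiffWitness_partitions_nonnegative_py.2) ∧
  Pre_partitions_nonnegative_py (pvDiffWitness_partitions_nonnegative_py.1) (pvDiffWitness_partitions_nonnegative_py.2) ∧
  D_partitions_nonnegative_py (pvDiffWitness_partitions_nonnegative_py.1) (pvDiffWitness_partitions_nonnegative_py.2) ∧
  partitions_nonnegative_py (pvDiffWitness_partitions_nonnegative_py.1) (pvDiffWitness_partitions_nonnegative_py.2) = pvDiffWitnessOut_partitions_nonnegative_py.1 ∧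
  partitions_nonnegative_py_alt (pvDiffWitness_partitions_nonnegative_py.1) (pvDiffWitness_partitions_nonnegative_py.2) = pvDiffWitnessOut_partitions_nonnegative_py.2 ∧
  pvDiffWitnessOut_partitions_nonnegative_py.1 ≠ pvDiffWitnessOut_partitions_nonnegative_py.2
def Claim_exact_partitions_nonnegative_py : Prop :=
  ∀ (m : Int) (n : Int), Dom_partitions_nonnegative_py m n →
    Pre_partitions_nonnegative_py m n →
    D_partitions_nonnegative_py m n →
    partitions_nonnegative_py m n ≠ partitions_nonnegative_py_alt m n

-- ===== LEMMAS AND PROOFS =====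

lemma pv_flatMap_congr {α β : Type} {l : List α} {f g : α → List β}
    (h : ∀ x ∈ l, f x = g x) : l.flatMap f = l.flatMap g := by
  simp only [List.flatMap_def]
  exact congrArg List.flatten (List.map_congr_left h)

lemma pvAFuel_succ (f : Nat) (m n : Int) :
    pvAFuel (f+1) m n =
      (if m = 1 then [[n]]
       else if m = 0 then [[]]
       else (PySem.List.pyRange 0 (n+1) 1).flatMap (fun i =>
         (pvAFuel f (m-1) (n-i)).map (fun p => i :: p))) := rfl

-- fuel irrelevance: for m = k+1 ≥ 1, any fuel ≥ k+1 gives the same result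
lemma pvAFuel_fuel_eq (k : Nat) : ∀ (f : Nat) (n : Int), k + 1 ≤ f →
    pvAFuel f ((k : Int) + 1) n = pvAFuel (k + 1) ((k : Int) + 1) n := by
  induction k with
  | zero =>
    intro f n hf
    obtain ⟨f', rfl⟩ : ∃ f', f = f' + 1 := ⟨f - 1, by omega⟩
    simp [pvAFuel]
  | succ k ih =>
    intro f n hf
    obtain ⟨f', rfl⟩ : ∃ f', f = f' + 1 := ⟨f - 1, by omega⟩
    rw [pvAFuel_succ f', pvAFuel_succ (k+1)]
    push_cast
    rw [if_neg (by omega : ¬ ((k : Int) + 1 + 1 = 1)),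
        if_neg (by omega : ¬ ((k : Int) + 1 + 1 = 0)),
        show (k : Int) + 1 + 1 - 1 = (k : Int) + 1 by ring]
    apply pv_flatMap_congr
    intro i _
    rw [ih f' (n - i) (by omega)]

-- the number of loop iterations spent on one stack entry with k parts and residual r
def pvW : Nat → Nat → Nat
  | 0, _ => 1
  | 1, _ => 1
  | (k+2), r => 1 + ((List.range (r+1)).map (fun i => pvW (k+1) (r - i))).sum

lemma pvW_le_pow (k : Nat) : ∀ (r : Nat), pvW (k+1) r ≤ (r+2)^(k+1) := by
  induction k with
  | zero => intro r; simp [pvW]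
  | succ k ih =>
    intro r
    have hsum : ((List.range (r+1)).map (fun i => pvW (k+1) (r - i))).sum
        ≤ (r+1) * (r+2)^(k+1) := by
      have hb : ∀ x ∈ (List.range (r+1)).map (fun i => pvW (k+1) (r - i)),
          x ≤ (r+2)^(k+1) := by
        intro x hx
        obtain ⟨i, hi, rfl⟩ := List.mem_map.mp hx
        exact le_trans (ih (r - i)) (Nat.pow_le_pow_left (by omega) _)
      have := List.sum_le_card_nsmul _ _ hb
      simpa [List.length_map, List.length_range, Nat.smul_one_eq_cast] using this
    have h1 : 1 ≤ (r+2)^(k+1) := Nat.one_le_pow _ _ (by omega)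
    have : pvW (k+2) r = 1 + ((List.range (r+1)).map (fun i => pvW (k+1) (r - i))).sum := by
      rw [pvW]
    rw [this, pow_succ]
    nlinarith

lemma pvBLoop_nil (fuel : Nat) : pvBLoop fuel [] = [] := by
  cases fuel <;> rfl

-- running the loop on one well-formed entry consumes exactly pvW fuel and emits
-- A's enumeration of (k+1, r), each element behind the entry's prefix
lemma pvB_run (k : Nat) : ∀ (r : Nat) (pre : List Int)
    (rest : List (List Int × Int × Int)) (extra : Nat),
    pvBLoop (pvW (k+1) r + extra) ((pre, ((k : Int) + 1), ((r : Nat) : Int)) :: rest)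
      = (pvAFuel (k+1) ((k : Int) + 1) ((r : Nat) : Int)).map (fun t => pre ++ t)
        ++ pvBLoop extra rest := by
  induction k with
  | zero =>
    intro r pre rest extra
    show pvBLoop (1 + extra) _ = _
    rw [Nat.add_comm 1 extra]
    simp [pvBLoop, pvAFuel]
  | succ k ih =>
    intro r pre rest extra
    -- the children list, in pop order
    have hrange : PySem.List.pyRange 0 (((r : Nat) : Int) + 1) 1
        = (List.range (r+1)).map (fun j => ((j : Nat) : Int)) := by
      rw [PySem.List.pyRange_one]
      simp
    have inner : ∀ (js : List Nat), (∀ j ∈ js, j ≤ r) →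
        ∀ (rest' : List (List Int × Int × Int)) (extra' : Nat),
        pvBLoop ((js.map (fun j => pvW (k+1) (r - j))).sum + extra')
          ((js.map (fun j => (pre ++ [((j : Nat) : Int)], (k : Int) + 1,
              ((r : Nat) : Int) - ((j : Nat) : Int)))) ++ rest')
        = (js.flatMap (fun j =>
            (pvAFuel (k+1) ((k : Int) + 1) (((r - j : Nat)) : Int)).map
              (fun t => (pre ++ [((j : Nat) : Int)]) ++ t))) ++ pvBLoop extra' rest' := by
      intro js
      induction js with
      | nil => intro _ rest' extra'; simp
      | cons j js ihl =>
        intro hb rest' extra'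
        have hj : j ≤ r := hb j (List.mem_cons_self)
        have hcast : ((r : Nat) : Int) - ((j : Nat) : Int) = (((r - j : Nat)) : Int) := by
          omega
        simp only [List.map_cons, List.sum_cons, List.cons_append, hcast]
        rw [Nat.add_assoc, ih (r - j) (pre ++ [((j : Nat) : Int)]) _ _]
        rw [ihl (fun x hx => hb x (List.mem_cons_of_mem _ hx)) rest' extra']
        simp [List.flatMap_cons]
    -- unfold one loop step
    have hW : pvW (k+2) r + extra
        = (((List.range (r+1)).map (fun i => pvW (k+1) (r - i))).sum + extra) + 1 := by
      rw [pvW]; omega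
    show pvBLoop (pvW (k+2) r + extra) _ = _
    rw [hW]
    simp only [pvBLoop]
    rw [if_neg (by push_cast; omega : ¬ ((((k+1 : Nat)) : Int) + 1 = 1))]
    rw [show (((k+1 : Nat)) : Int) + 1 - 1 = ((k : Nat) : Int) + 1 by push_cast; ring]
    rw [hrange, List.map_map]
    have hmap : ((fun i => (pre ++ [i], ((k : Nat) : Int) + 1, ((r : Nat) : Int) - i)) ∘
        (fun j : Nat => ((j : Nat) : Int)))
        = (fun j : Nat => (pre ++ [((j : Nat) : Int)], ((k : Nat) : Int) + 1,
            ((r : Nat) : Int) - ((j : Nat) : Int))) := rfl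
    rw [hmap]
    rw [inner (List.range (r+1)) (fun j hj => by simpa using Nat.lt_succ_iff.mp (List.mem_range.mp hj)) rest extra]
    congr 1
    -- the emitted block equals A's enumeration behind the prefix
    rw [pvAFuel_succ (k+1)]
    rw [if_neg (by push_cast; omega : ¬ ((((k+1 : Nat)) : Int) + 1 = 1)),
        if_neg (by push_cast; omega : ¬ ((((k+1 : Nat)) : Int) + 1 = 0)),
        show (((k+1 : Nat)) : Int) + 1 - 1 = ((k : Nat) : Int) + 1 by push_cast; ring]
    rw [hrange, List.flatMap_map, List.map_flatMap]
    apply pv_flatMap_congr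
    intro j hj
    have hjr : j ≤ r := by simpa using Nat.lt_succ_iff.mp (List.mem_range.mp hj)
    have hcast : ((r : Nat) : Int) - ((j : Nat) : Int) = (((r - j : Nat)) : Int) := by omega
    rw [hcast, List.map_map]
    apply List.map_congr_left
    intro t _
    simp

theorem partitions_nonnegative_py_spec : Claim_unchanged_partitions_nonnegative_py := by
  intro m n _ hpre hnd
  unfold partitions_nonnegative_py partitions_nonnegative_py_alt
  unfold D_partitions_nonnegative_py at hnd
  by_cases hm0 : m = 0
  · subst hm0; simp [pvAFuel]
  · rw [if_neg hm0]
    by_cases hn : n < 0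
    · -- n < 0: outside D_ we have m ≠ 1, so A's loop body never runs and B returns []
      rw [if_pos hn]
      have h1 : ¬ m = 1 := fun h => hnd ⟨h, hn⟩
      obtain ⟨f, hf⟩ : ∃ f, m.toNat + 1 = f + 1 := ⟨m.toNat, rfl⟩
      rw [hf]
      simp only [pvAFuel, if_neg h1, if_neg hm0]
      rw [PySem.List.pyRange_one_eq_nil (by omega)]
      simp
    · -- 0 ≤ n and (by Pre_) 1 ≤ m: both sides are A's enumeration
      rw [if_neg hn]
      have hm1 : 1 ≤ m := by rcases hpre with h | h <;> omega
      obtain ⟨a, rfl⟩ : ∃ a : Nat, m = (a : Int) + 1 := ⟨(m - 1).toNat, by omega⟩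
      obtain ⟨b, rfl⟩ : ∃ b : Nat, n = (b : Int) := ⟨n.toNat, by omega⟩
      have h1 : ((a : Int) + 1).toNat = a + 1 := by omega
      have h2 : ((b : Int)).toNat = b := by omega
      rw [h1, h2]
      have hpow := pvW_le_pow a b
      rw [show (b + 2) ^ (a + 1) = pvW (a+1) b + ((b + 2) ^ (a + 1) - pvW (a+1) b) by omega]
      rw [pvB_run a b [] [] _]
      rw [pvBLoop_nil]
      simp only [List.nil_append, List.map_id', List.append_nil]
      exact pvAFuel_fuel_eq a (a+1+1) (b : Int) (by omega)
theorem partitions_nonnegative_py_changed : Claim_changed_partitions_nonnegative_py := by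
  unfold Claim_changed_partitions_nonnegative_py; decide
theorem partitions_nonnegative_py_tight : Claim_exact_partitions_nonnegative_py := by
  intro m n _ _ hd
  obtain ⟨hm, hn⟩ := hd
  subst hm
  unfold partitions_nonnegative_py partitions_nonnegative_py_alt
  simp [pvAFuel, hn]
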